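-- pv_equiv track=rewrite | github.com/ignity21/anki-smart-deck | src/anki_smart_deck/_card_gen.py | _generate_syllabication
-- ===== SOURCE A (Python) =====
-- def _generate_syllabication(word: str, us_pron: str) -> str:
--     """Generate syllabication from word and pronunciation.
--
--     Args:
--         word: The word to syllabicate
--         us_pron: US pronunciation (IPA) for reference
--
--     Returns:
--         Syllabicated word (e.g., "ser-en-dip-i-ty")
--     """
--     # This is a simple heuristic approach
--     # For production, you might want to use a proper syllabication library
--     # or add syllabication to the AI prompt
--
--     # For now, we'll use a basic pattern based on common syllable breaks
--     # This could be improved with AI generation or a syllabication library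
--
--     # Simple heuristic: split on vowel-consonant boundaries
--     # But this is very basic - ideally syllabication should come from AI
--     syllabified = word.lower()
--
--     # Add hyphens before consonants that follow vowels
--     # This is a placeholder - real syllabication is complex
--     vowels = "aeiouAEIOU"
--     result = []
--     prev_vowel = False
--
--     for i, char in enumerate(syllabified):
--         is_vowel = char in vowels
--         if i > 0 and not is_vowel and prev_vowel and i < len(syllabified) - 1:
--             # Check if next char is also consonant
--             if i + 1 < len(syllabified) and syllabified[i + 1] not in vowels:
--                 result.append("-")
--         result.append(char)
--         prev_vowel = is_vowel
--
--     return "".join(result)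
-- ===== SOURCE B (Python) =====
-- def _generate_syllabication(word: str, us_pron: str) -> str:
--     """Two staged passes: first compute all syllable-break positions, then
--     split the lowered word at those positions and join the parts with hyphens."""
--     s = word.lower()
--     vowels = "aeiou"
--     cuts = [i + 1 for i in range(len(s) - 2)
--             if s[i] in vowels and s[i + 1] not in vowels and s[i + 2] not in vowels]
--     parts = [s[a:b] for a, b in zip([0] + cuts, cuts + [len(s)])]
--     return "-".join(parts)
-- ===== Notes on version B (the rewrite author's own statement) =====
-- stated objective: alternative
-- what changed: Instead of streaming characters through a loop with a prev_vowel flag that emits hyphens on the fly, B first computes the list of syllable-break positions (a filtered range), then slices the word at those positions and joins the parts with '-'.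
import Mathlib
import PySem

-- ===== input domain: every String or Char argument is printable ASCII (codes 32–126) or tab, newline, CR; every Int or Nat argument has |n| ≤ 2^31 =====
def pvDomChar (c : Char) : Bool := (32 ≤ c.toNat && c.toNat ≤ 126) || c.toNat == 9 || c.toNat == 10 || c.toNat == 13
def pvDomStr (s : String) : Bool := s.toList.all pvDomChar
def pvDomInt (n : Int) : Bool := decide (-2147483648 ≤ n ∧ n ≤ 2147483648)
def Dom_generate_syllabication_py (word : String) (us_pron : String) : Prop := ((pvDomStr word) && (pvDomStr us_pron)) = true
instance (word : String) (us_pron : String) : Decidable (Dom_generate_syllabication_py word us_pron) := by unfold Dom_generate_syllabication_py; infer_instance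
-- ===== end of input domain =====

-- B replaces A's streaming loop with a prev_vowel flag by a staged algorithm:
-- first compute all syllable-break positions, then slice the lowered word at
-- those positions and join the parts with hyphens (objective: alternative).


-- ===== PORT A =====
-- vowels = "aeiouAEIOU"
def gsVowels : List Char := ['a','e','i','o','u','A','E','I','O','U']

-- the for-loop over enumerate(syllabified), state (result, prev_vowel)
def gsALoop (s : List Char) (pairs : List (Int × Char)) (result : List String) (prev : Bool) : List String :=
  match pairs with
  | [] => result
  | (i, c) :: rest =>
    let isv := gsVowels.contains c
    let result1 :=
      if i > 0 ∧ isv = false ∧ prev = true ∧ i < (s.length : Int) - 1 then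
        -- check if next char is also consonant
        if i + 1 < (s.length : Int) ∧ gsVowels.contains (PySem.List.pyGetD s (i + 1) ' ') = false then
          result ++ ["-"]
        else result
      else result
    gsALoop s rest (result1 ++ [String.singleton c]) isv

def generate_syllabication_py (word : String) (us_pron : String) : String :=
  String.join (gsALoop ((PySem.Str.lower word).toList)
    (PySem.List.enumerate ((PySem.Str.lower word).toList)) [] false)

-- ===== PORT B =====
-- vowels = "aeiou"  (B works on the lowered word, strings as char lists)
def gsVowelsB : List Char := ['a','e','i','o','u']

-- cuts = [i+1 for i in range(len(s)-2) if s[i] in vowels and s[i+1] not in vowels and s[i+2] not in vowels]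
-- parts = [s[a:b] for a,b in zip([0]+cuts, cuts+[len(s)])];  return "-".join(parts)
def generate_syllabication_py_alt (word : String) (us_pron : String) : String :=
  let s := (PySem.Str.lower word).toList
  let cuts : List Int := ((PySem.List.pyRange 0 ((s.length : Int) - 2) 1).filter
      (fun i => gsVowelsB.contains (PySem.List.pyGetD s i ' ')
        && !gsVowelsB.contains (PySem.List.pyGetD s (i+1) ' ')
        && !gsVowelsB.contains (PySem.List.pyGetD s (i+2) ' '))).map (fun i => i + 1)
  let parts : List (List Char) :=
    (List.zip ((0:Int) :: cuts) (cuts ++ [(s.length : Int)])).map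
      (fun ab => PySem.List.slice s (some ab.1) (some ab.2))
  String.ofList (PySem.Chars.join ['-'] parts)

-- ===== PRECONDITION & SPEC =====
def Spec_generate_syllabication_py (word : String) (us_pron : String) (out : String) : Prop := out = generate_syllabication_py_alt word us_pron
instance (word : String) (us_pron : String) (out : String) : Decidable (Spec_generate_syllabication_py word us_pron out) := by unfold Spec_generate_syllabication_py; infer_instance

-- ===== CLAIM (what is proved, stated in full; the proofs are below) =====
def Claim_equal_generate_syllabication_py : Prop := ∀ (word : String) (us_pron : String), Dom_generate_syllabication_py word us_pron → Spec_generate_syllabication_py word us_pron (generate_syllabication_py word us_pron)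

-- ===== LEMMAS AND PROOFS =====

-- characters emitted by A's loop from a suffix, given prev_vowel and whether we are at index 0
def gsEmit (prev : Bool) (first : Bool) : List Char → List Char
  | [] => []
  | c :: rest =>
    (if !first && !(gsVowels.contains c) && prev &&
        (match rest with | d :: _ => !(gsVowels.contains d) | [] => false)
     then ['-', c] else [c]) ++ gsEmit (gsVowels.contains c) false rest

lemma gsALoop_emit (t : List Char) : ∀ (s : List Char) (k : Nat) (result : List String) (prev : Bool),
    s.drop k = t →
    gsALoop s (PySem.List.enumerate t (k : Int)) result prev
      = result ++ (gsEmit prev (k == 0) t).map String.singleton := by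
  induction t with
  | nil => intro s k result prev h; simp [PySem.List.enumerate_nil, gsALoop, gsEmit]
  | cons c rest ih =>
    intro s k result prev hdrop
    have hk : k < s.length := by
      rcases Nat.lt_or_ge k s.length with h | h
      · exact h
      · rw [List.drop_eq_nil_of_le h] at hdrop; exact absurd hdrop (by simp)
    have hdrop1 : s.drop (k + 1) = rest := by
      have h := List.drop_drop (l := s) (i := 1) (j := k)
      rw [hdrop] at h
      simpa [Nat.add_comm] using h.symm
    rw [PySem.List.enumerate_cons, gsALoop]
    cases rest with
    | nil =>
      have hlast : ¬ ((k : Int) < (s.length : Int) - 1) := by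
        have := List.drop_eq_nil_iff.mp hdrop1
        omega
      rw [if_neg (fun h => hlast h.2.2.2)]
      have ih' := ih s (k + 1) (result ++ [String.singleton c]) (gsVowels.contains c) hdrop1
      push_cast at ih'
      rw [ih']
      simp [gsEmit]
    | cons d r =>
      have hlen : (k : Int) + 1 < (s.length : Int) := by
        have : k + 1 < s.length := by
          by_contra h
          simp [List.drop_eq_nil_of_le (Nat.le_of_not_lt h)] at hdrop1
        omega
      have hget : PySem.List.pyGetD s ((k : Int) + 1) ' ' = d := by
        have h1 : s[k + 1]? = some d := by
          have h0 : (s.drop (k + 1))[0]? = some d := by rw [hdrop1]; rfl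
          rwa [List.getElem?_drop, Nat.add_zero] at h0
        have h2 := PySem.List.pyGetD_natCast (xs := s) (n := k + 1) (d := ' ')
        push_cast at h2
        rw [h2, List.getD_eq_getElem?_getD, h1]
        rfl
      have ih' := ih s (k + 1) (((if (k : Int) > 0 ∧ gsVowels.contains c = false ∧ prev = true ∧ (k : Int) < (s.length : Int) - 1 then
          if (k : Int) + 1 < (s.length : Int) ∧ gsVowels.contains (PySem.List.pyGetD s ((k : Int) + 1) ' ') = false then result ++ ["-"]
          else result
        else result) ++ [String.singleton c])) (gsVowels.contains c) hdrop1
      push_cast at ih'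
      rw [ih']
      have hlt : (k : Int) < (s.length : Int) - 1 := by omega
      rcases Nat.eq_zero_or_pos k with hk0 | hk0
      · subst hk0
        by_cases hv : c ∈ gsVowels <;> by_cases hp : prev = true <;>
          by_cases hd : d ∈ gsVowels <;>
          simp [gsEmit, hget, hv, hp, hd, hlen, hlt, show "-" = String.singleton '-' from rfl]
      · have hki : (0 : Int) < (k : Int) := by omega
        have hkne : (k == 0) = false := by simp; omega
        by_cases hv : c ∈ gsVowels <;> by_cases hp : prev = true <;>
          by_cases hd : d ∈ gsVowels <;>
          simp [gsEmit, hget, hv, hp, hd, hlen, hlt, hki, hkne, hk0, show "-" = String.singleton '-' from rfl]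

-- proof-side view shared by both ports: the rewritten character stream
def gsGo : List Char → List Char
  | a :: b :: c :: rest =>
    if gsVowels.contains a = true ∧ gsVowels.contains b = false ∧ gsVowels.contains c = false then
      a :: '-' :: gsGo (b :: c :: rest)
    else
      a :: gsGo (b :: c :: rest)
  | t => t
termination_by cs => cs.length

lemma gsJoin_map_singleton (l : List Char) : String.join (l.map String.singleton) = String.ofList l := by
  rw [← String.toList_inj]
  simp
  induction l <;> simp [*]

lemma gsGo_emit (rest : List Char) : ∀ a, gsGo (a :: rest) = a :: gsEmit (gsVowels.contains a) false rest := by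
  induction rest with
  | nil => intro a; simp [gsGo, gsEmit]
  | cons b r ih =>
    intro a
    cases r with
    | nil =>
      simp [gsGo, gsEmit]
    | cons c r' =>
      rw [gsGo, ih b]
      by_cases hv : a ∈ gsVowels <;> by_cases hb : b ∈ gsVowels <;> by_cases hc : c ∈ gsVowels <;>
        simp [gsEmit, hv, hb, hc]

-- ===== B-side lemmas: cuts / parts / join =====

-- lower() never yields an upper-case vowel
lemma gsLower_not_upper (c : Char) :
    PySem.Chars.lowerChar c ∉ (['A','E','I','O','U'] : List Char) := by
  unfold PySem.Chars.lowerChar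
  split
  · rename_i h
    simp only [PySem.Chars.isupper, Bool.and_eq_true, decide_eq_true_eq, Char.le_def] at h
    have h1 : 65 ≤ c.toNat := h.1
    have h2 : c.toNat ≤ 90 := h.2
    have ht : (Char.ofNat (c.toNat + 32)).toNat = c.toNat + 32 := by
      rw [Char.toNat_ofNat, if_pos (Or.inl (by omega))]
    intro hmem
    simp only [List.mem_cons, List.not_mem_nil, or_false] at hmem
    rcases hmem with he | he | he | he | he <;>
      · have h3 := congrArg Char.toNat he
        rw [ht] at h3
        simp only [show ('A').toNat = 65 from rfl, show ('E').toNat = 69 from rfl,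
          show ('I').toNat = 73 from rfl, show ('O').toNat = 79 from rfl,
          show ('U').toNat = 85 from rfl] at h3
        omega
  · rename_i h
    simp only [PySem.Chars.isupper, Bool.and_eq_true, decide_eq_true_eq, Char.le_def, not_and_or] at h
    intro hmem
    simp only [List.mem_cons, List.not_mem_nil, or_false] at hmem
    rcases hmem with he | he | he | he | he <;> subst he <;>
      rcases h with h | h <;> revert h <;> decide

-- on such a character the two vowel tests agree
lemma gsContains_agree (d : Char) (hd : d ∉ (['A','E','I','O','U'] : List Char)) :
    gsVowelsB.contains d = gsVowels.contains d := by
  simp only [gsVowels, gsVowelsB, List.contains_eq_mem, List.mem_cons, List.not_mem_nil] at *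
  by_cases h : d = 'a' ∨ d = 'e' ∨ d = 'i' ∨ d = 'o' ∨ d = 'u' <;> simp_all

lemma gsGetD_agree (s : List Char) (hs : ∀ c ∈ s, c ∉ (['A','E','I','O','U'] : List Char)) (k : Nat) :
    gsVowelsB.contains (s.getD k ' ') = gsVowels.contains (s.getD k ' ') := by
  by_cases hk : k < s.length
  · rw [List.getD_eq_getElem s ' ' hk]
    exact gsContains_agree _ (hs _ (List.getElem_mem hk))
  · rw [List.getD_eq_default s ' ' (Nat.le_of_not_lt hk)]
    decide

-- the window condition at position k and the break positions
def gsCond (s : List Char) (k : Nat) : Bool :=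
  gsVowels.contains (s.getD k ' ') && !gsVowels.contains (s.getD (k+1) ' ')
    && !gsVowels.contains (s.getD (k+2) ' ')

def gsNatCuts (s : List Char) : List Nat :=
  ((List.range (s.length - 2)).filter (gsCond s)).map (· + 1)

def gsPartsN (s : List Char) (cuts : List Nat) : List (List Char) :=
  (List.zip (0 :: cuts) (cuts ++ [s.length])).map
    (fun ab => List.take (ab.2 - ab.1) (List.drop ab.1 s))

lemma gsNatCuts_cons (a b c : Char) (rest : List Char) :
    gsNatCuts (a :: b :: c :: rest)
      = (if gsVowels.contains a && !gsVowels.contains b && !gsVowels.contains c then [1] else [])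
        ++ (gsNatCuts (b :: c :: rest)).map (· + 1) := by
  unfold gsNatCuts
  have hlen : (a :: b :: c :: rest).length - 2 = ((b :: c :: rest).length - 2) + 1 := by simp
  rw [hlen, List.range_succ_eq_map, List.filter_cons, List.filter_map]
  have hcond0 : gsCond (a :: b :: c :: rest) 0
      = (gsVowels.contains a && !gsVowels.contains b && !gsVowels.contains c) := by
    simp [gsCond]
  have hshift : (gsCond (a :: b :: c :: rest) ∘ Nat.succ) = gsCond (b :: c :: rest) := by
    funext k
    simp [gsCond]
  rw [hcond0, hshift]
  by_cases h : (gsVowels.contains a && !gsVowels.contains b && !gsVowels.contains c) = true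
  · rw [if_pos h, h, if_pos rfl]
    simp [List.map_map, Function.comp_def, Nat.succ_eq_add_one]
  · rw [if_neg h, Bool.not_eq_true] at *
    rw [h]
    simp [List.map_map, Function.comp_def, Nat.succ_eq_add_one]

-- a shifted cut list against a::t splices to a cons
lemma gsJD_cons_head (a : Char) (p : List Char) (ps : List (List Char)) :
    PySem.Chars.join ['-'] ((a :: p) :: ps) = a :: PySem.Chars.join ['-'] (p :: ps) := by
  cases ps with
  | nil => rw [PySem.Chars.join_singleton, PySem.Chars.join_singleton]
  | cons q r => rw [PySem.Chars.join_cons_cons, PySem.Chars.join_cons_cons]; simp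

lemma gsParts_shift (a : Char) (t : List Char) (cs : List Nat) :
    PySem.Chars.join ['-'] (gsPartsN (a :: t) (cs.map (· + 1)))
      = a :: PySem.Chars.join ['-'] (gsPartsN t cs) := by
  cases cs with
  | nil =>
    unfold gsPartsN
    simp [PySem.Chars.join_singleton]
  | cons c cs' =>
    have hmain : gsPartsN (a :: t) ((c :: cs').map (· + 1))
        = (a :: List.take (c - 0) (List.drop 0 t))
          :: ((c :: cs').zip (cs' ++ [t.length])).map
              (fun ab : Nat × Nat => List.take (ab.2 - ab.1) (List.drop ab.1 t)) := by
      unfold gsPartsN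
      have hsent : (List.map (· + 1) (c :: cs')) ++ [(a :: t).length]
          = ((c :: cs') ++ [t.length]).map (· + 1) := by simp
      rw [hsent]
      have hz : (0 :: List.map (· + 1) (c :: cs')) = (0 :: ((c :: cs').map (· + 1))) := rfl
      rw [hz]
      -- zip (0 :: map f l) (map f (l ++ [n])) : peel the head
      rw [show ((c :: cs') ++ [t.length]).map (· + 1) = (c+1) :: ((cs' ++ [t.length]).map (· + 1)) by simp]
      rw [show (0 :: ((c :: cs').map (· + 1))) = 0 :: (c+1) :: (cs'.map (· + 1)) by simp]
      rw [List.zip_cons_cons, List.map_cons]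
      have htail : List.map (fun ab => List.take (ab.2 - ab.1) (List.drop ab.1 (a :: t)))
            (((c + 1) :: List.map (· + 1) cs').zip (List.map (· + 1) (cs' ++ [t.length])))
          = List.map (fun ab : Nat × Nat => List.take (ab.2 - ab.1) (List.drop ab.1 t))
            ((c :: cs').zip (cs' ++ [t.length])) := by
        rw [show (c+1) :: (cs'.map (· + 1)) = ((c :: cs').map (· + 1)) by simp, List.zip_map,
          List.map_map]
        congr 1
        funext ab
        simp [Prod.map]
      rw [htail]
      simp
    rw [hmain]
    rw [gsJD_cons_head]
    congr 1

lemma gsParts_shift_cut (a : Char) (t : List Char) (cs : List Nat) :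
    gsPartsN (a :: t) (1 :: cs.map (· + 1)) = [a] :: gsPartsN t cs := by
  unfold gsPartsN
  have hsent : ((1:Nat) :: cs.map (· + 1)) ++ [(a :: t).length]
      = (1 :: cs.map (· + 1)) ++ [t.length + 1] := by simp
  have hshift : (cs.map (· + 1)) ++ [t.length + 1] = ((cs ++ [t.length]).map (· + 1)) := by simp
  simp only [List.zip_cons_cons, List.cons_append, List.map_cons, List.length_cons, hshift]
  congr 1
  have h1 : ((1:Nat) :: cs.map (· + 1)) = ((0 :: cs).map (· + 1)) := by simp
  rw [h1, List.zip_map, List.map_map]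
  congr 1
  funext ab
  simp [Prod.map]

lemma gsPartsN_ne_nil (t : List Char) (cs : List Nat) : gsPartsN t cs ≠ [] := by
  cases cs <;> simp [gsPartsN]

-- main B-side lemma: splitting at the computed cuts and joining with '-' is gsGo
lemma gsSplice_go (s : List Char) :
    PySem.Chars.join ['-'] (gsPartsN s (gsNatCuts s)) = gsGo s := by
  induction s with
  | nil => simp [gsNatCuts, gsPartsN, gsGo, PySem.Chars.join_singleton]
  | cons a t ih =>
    cases t with
    | nil => simp [gsNatCuts, gsPartsN, gsGo, PySem.Chars.join_singleton]
    | cons b t2 =>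
      cases t2 with
      | nil => simp [gsNatCuts, gsPartsN, gsGo, PySem.Chars.join_singleton]
      | cons c rest =>
        rw [gsNatCuts_cons]
        by_cases h : (gsVowels.contains a && !gsVowels.contains b && !gsVowels.contains c) = true
        · rw [if_pos h]
          simp only [List.cons_append, List.nil_append]
          rw [gsParts_shift_cut]
          obtain ⟨p, ps, hp⟩ : ∃ p ps, gsPartsN (b :: c :: rest) (gsNatCuts (b :: c :: rest)) = p :: ps := by
            rcases hq : gsPartsN (b :: c :: rest) (gsNatCuts (b :: c :: rest)) with _ | ⟨p, ps⟩
            · exact absurd hq (gsPartsN_ne_nil _ _)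
            · exact ⟨p, ps, rfl⟩
          rw [hp, PySem.Chars.join_cons_cons, ← hp, ih]
          have h' : gsVowels.contains a = true ∧ gsVowels.contains b = false ∧ gsVowels.contains c = false := by
            simp only [Bool.and_eq_true, Bool.not_eq_true'] at h
            exact ⟨h.1.1, h.1.2, h.2⟩
          rw [gsGo, if_pos h']
          simp
        · rw [if_neg h]
          simp only [List.nil_append]
          rw [gsParts_shift, ih]
          have h' : ¬ (gsVowels.contains a = true ∧ gsVowels.contains b = false ∧ gsVowels.contains c = false) := by
            intro hc
            exact h (by rw [hc.1, hc.2.1, hc.2.2]; rfl)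
          rw [gsGo, if_neg h']


lemma gsAlt_core (s : List Char) (hagree : ∀ c ∈ s, c ∉ (['A','E','I','O','U'] : List Char)) :
    String.ofList (PySem.Chars.join ['-']
      ((List.zip ((0:Int) :: ((PySem.List.pyRange 0 ((s.length : Int) - 2) 1).filter
          (fun i => gsVowelsB.contains (PySem.List.pyGetD s i ' ')
            && !gsVowelsB.contains (PySem.List.pyGetD s (i+1) ' ')
            && !gsVowelsB.contains (PySem.List.pyGetD s (i+2) ' '))).map (fun i => i + 1))
        (((PySem.List.pyRange 0 ((s.length : Int) - 2) 1).filter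
          (fun i => gsVowelsB.contains (PySem.List.pyGetD s i ' ')
            && !gsVowelsB.contains (PySem.List.pyGetD s (i+1) ' ')
            && !gsVowelsB.contains (PySem.List.pyGetD s (i+2) ' '))).map (fun i => i + 1)
          ++ [(s.length : Int)])).map
        (fun ab => PySem.List.slice s (some ab.1) (some ab.2))))
    = String.ofList (gsGo s) := by
  have htn : ((s.length : Int) - 2).toNat = s.length - 2 := by omega
  have hcuts : ((PySem.List.pyRange 0 ((s.length : Int) - 2) 1).filter
      (fun i => gsVowelsB.contains (PySem.List.pyGetD s i ' ')
        && !gsVowelsB.contains (PySem.List.pyGetD s (i+1) ' ')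
        && !gsVowelsB.contains (PySem.List.pyGetD s (i+2) ' '))).map (fun i => i + 1)
      = (gsNatCuts s).map (fun n : Nat => (n : Int)) := by
    rw [PySem.List.pyRange_one, List.filter_map]
    simp only [Int.sub_zero, htn]
    have hpred : ((fun i => gsVowelsB.contains (PySem.List.pyGetD s i ' ')
          && !gsVowelsB.contains (PySem.List.pyGetD s (i+1) ' ')
          && !gsVowelsB.contains (PySem.List.pyGetD s (i+2) ' ')) ∘ (fun k : Nat => (0 : Int) + ↑k))
        = gsCond s := by
      funext k
      simp only [Function.comp_apply, zero_add]
      rw [show ((k:Int) + 1) = (((k+1 : Nat)) : Int) from by push_cast; ring,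
         show ((k:Int) + 2) = (((k+2 : Nat)) : Int) from by push_cast; ring,
         show ((k:Int)) = (((k : Nat)) : Int) from rfl]
      simp only [PySem.List.pyGetD_natCast]
      unfold gsCond
      rw [gsGetD_agree s hagree k, gsGetD_agree s hagree (k+1), gsGetD_agree s hagree (k+2)]
    rw [hpred]
    unfold gsNatCuts
    rw [List.map_map]
    have hfun : ((fun i : Int => i + 1) ∘ (fun k : Nat => (0:Int) + (k:Int)))
        = ((fun n : Nat => (n : Int)) ∘ (fun k : Nat => k + 1)) := by
      funext k
      simp [Function.comp]
    rw [hfun, ← List.map_map]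
  rw [hcuts]
  have hzip : List.zip ((0:Int) :: (gsNatCuts s).map (fun n : Nat => (n : Int)))
        ((gsNatCuts s).map (fun n : Nat => (n : Int)) ++ [(s.length : Int)])
      = (List.zip (0 :: gsNatCuts s) (gsNatCuts s ++ [s.length])).map
          (Prod.map (fun n : Nat => (n : Int)) (fun n : Nat => (n : Int))) := by
    rw [← List.zip_map]
    congr 1 <;> simp
  rw [hzip, List.map_map]
  have hslice : ((fun ab => PySem.List.slice s (some ab.1) (some ab.2))
        ∘ Prod.map (fun n : Nat => (n : Int)) (fun n : Nat => (n : Int)))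
      = (fun ab : Nat × Nat => List.take (ab.2 - ab.1) (List.drop ab.1 s)) := by
    funext ab
    simp [Prod.map, PySem.List.slice_natCast]
  rw [hslice]
  rw [show (List.zip (0 :: gsNatCuts s) (gsNatCuts s ++ [s.length])).map
        (fun ab : Nat × Nat => List.take (ab.2 - ab.1) (List.drop ab.1 s)) = gsPartsN s (gsNatCuts s) from rfl]
  rw [gsSplice_go]

lemma gsAlt_eq (word us_pron : String) : generate_syllabication_py_alt word us_pron
    = String.ofList (gsGo (PySem.Str.lower word).toList) := by
  have hagree : ∀ c ∈ (PySem.Str.lower word).toList, c ∉ (['A','E','I','O','U'] : List Char) := by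
    intro c hc
    rw [PySem.Str.toList_lower, PySem.Chars.lower, List.mem_map] at hc
    obtain ⟨c0, _, hc0⟩ := hc
    rw [← hc0]
    exact gsLower_not_upper c0
  exact gsAlt_core _ hagree

-- ===== VERDICT (by name: the statement is the Claim_ definition above) =====
theorem generate_syllabication_py_spec : Claim_equal_generate_syllabication_py := by
  intro word us_pron _
  unfold Spec_generate_syllabication_py
  have hA : generate_syllabication_py word us_pron
      = String.ofList (gsGo (PySem.Str.lower word).toList) := by
    unfold generate_syllabication_py
    have h := gsALoop_emit ((PySem.Str.lower word).toList) ((PySem.Str.lower word).toList) 0 [] false rfl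
    simp only [Nat.cast_zero] at h
    rw [h, List.nil_append, gsJoin_map_singleton]
    congr 1
    cases hs : (PySem.Str.lower word).toList with
    | nil => simp [gsEmit, gsGo]
    | cons a t =>
      rw [gsGo_emit]
      simp [gsEmit]
  rw [hA, gsAlt_eq]
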